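-- pv_equiv track=rewrite | github.com/portkeyss/cb2 | 1727-largest-submatrix-with-rearrangements/1727-largest-submatrix-with-rearrangements.py | largestSubmatrix
-- ===== SOURCE A (Python) =====
-- from typing import List
--
-- def largestSubmatrix(matrix: List[List[int]]) -> int:
--     m,n = len(matrix), len(matrix[0])
--     A = [[0]*n for _ in range(m)]
--     for i in range(m):
--         for j in range(n):
--             if matrix[i][j]==0:
--                 A[i][j] = 0
--             else:
--                 A[i][j] = 1+A[i-1][j] if i>0 else 1
--     res = 0
--     for i in range(m):
--         A[i].sort(reverse=True)
--         for j in range(n):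
--             if A[i][j]==0: break
--             res = max(res, A[i][j]*(j+1))
--     return res
-- ===== SOURCE B (Python) =====
-- def largestSubmatrix(matrix):
--     # Sort-free: instead of sorting each height row and maximizing height*rank,
--     # count how many columns reach each height and maximize h * (#columns with height >= h)
--     # over all thresholds h; equal because in the sorted row the j-th largest height h has
--     # exactly rank = (#columns >= h) at its best, and vice versa.
--     m, n = len(matrix), len(matrix[0])
--     heights = [0] * n
--     res = 0
--     for row in matrix:
--         heights = [heights[j] + 1 if row[j] else 0 for j in range(n)]
--         cnt = [0] * (m + 1)
--         for h in heights:
--             cnt[h] += 1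
--         ge = 0
--         for h in range(m, 0, -1):
--             ge += cnt[h]
--             if h * ge > res:
--                 res = h * ge
--     return res
-- ===== Notes on version B (the rewrite author's own statement) =====
-- stated objective: alternative
-- what changed: B never sorts: it keeps an incrementally updated height row, tallies how many columns reach each height into a counting array, and maximizes h * (#columns with height >= h) over thresholds h, instead of A's sort-each-row-descending and maximize height*rank.
import Mathlib
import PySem

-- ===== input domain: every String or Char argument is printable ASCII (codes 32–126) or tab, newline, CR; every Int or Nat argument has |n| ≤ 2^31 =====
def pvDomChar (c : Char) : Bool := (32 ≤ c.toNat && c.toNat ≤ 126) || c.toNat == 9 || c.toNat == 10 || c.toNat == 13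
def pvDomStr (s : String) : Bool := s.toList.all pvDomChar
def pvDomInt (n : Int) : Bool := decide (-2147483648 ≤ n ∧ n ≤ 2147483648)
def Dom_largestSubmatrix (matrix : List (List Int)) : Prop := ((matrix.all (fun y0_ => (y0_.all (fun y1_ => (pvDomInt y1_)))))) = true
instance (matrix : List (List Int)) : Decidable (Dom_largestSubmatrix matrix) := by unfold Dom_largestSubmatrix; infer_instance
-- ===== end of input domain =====

-- B is sort-free: it counts columns per height and maximizes threshold * (#columns with
-- height >= threshold), instead of A's per-row descending sort and height*rank maximum
-- (objective: alternative).


-- ===== PORT A =====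
-- inner scan of a (descending-sorted) row: 'for j in range(n): if row[j]==0: break; res = max(res, row[j]*(j+1))'
def scanA : List Int → Nat → Int → Int
  | [], _, res => res
  | h :: t, j, res => if h == 0 then res else scanA t (j + 1) (max res (h * ((j : Int) + 1)))

def largestSubmatrix (matrix : List (List Int)) : Int :=
  let m := matrix.length
  let n := (PySem.List.pyGetD matrix 0 []).length
  -- first loop: build the height matrix A (row i reads the previously appended row i-1)
  let A := (List.range m).foldl (fun acc (i : Nat) =>
      acc ++ [(List.range n).map (fun (j : Nat) =>
        if PySem.List.pyGetD (PySem.List.pyGetD matrix (i : Int) []) (j : Int) 0 == 0 then (0 : Int)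
        else if 0 < i then 1 + PySem.List.pyGetD (PySem.List.pyGetD acc ((i : Int) - 1) []) (j : Int) 0
        else 1)]) ([] : List (List Int))
  -- second loop: sort each row descending and scan it
  A.foldl (fun res row => scanA (PySem.List.sorted row (fun x => x) true) 0 res) 0

-- ===== PORT B =====
-- per row: incremental height row, counting array cnt ('cnt[h] += 1' is set at h.toNat),
-- then 'for h in range(m, 0, -1): ge += cnt[h]; if h*ge > res: res = h*ge'
def largestSubmatrix_alt (matrix : List (List Int)) : Int :=
  let m := matrix.length
  let n := (PySem.List.pyGetD matrix 0 []).length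
  (matrix.foldl (fun (s : List Int × Int) row =>
      let heights := (List.range n).map (fun (j : Nat) =>
        if PySem.List.pyGetD row (j : Int) 0 ≠ 0 then PySem.List.pyGetD s.1 (j : Int) 0 + 1 else 0)
      let cnt := heights.foldl (fun c h => c.set h.toNat (PySem.List.pyGetD c h 0 + 1))
          (List.replicate (m + 1) (0 : Int))
      let fin := (PySem.List.pyRange (m : Int) 0 (-1)).foldl
          (fun (q : Int × Int) h =>
            let ge := q.1 + PySem.List.pyGetD cnt h 0
            (ge, if h * ge > q.2 then h * ge else q.2)) ((0 : Int), s.2)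
      (heights, fin.2))
    (List.replicate n 0, (0 : Int))).2

-- ===== PRECONDITION & SPEC =====
-- Pre_ excludes exactly the inputs on which the Python raises IndexError: the empty matrix
-- (matrix[0]) and matrices with a row shorter than the first row (matrix[i][j], j < n).
def Pre_largestSubmatrix (matrix : List (List Int)) : Prop :=
  matrix ≠ [] ∧ ∀ row ∈ matrix, (PySem.List.pyGetD matrix 0 []).length ≤ row.length
instance (matrix : List (List Int)) : Decidable (Pre_largestSubmatrix matrix) := by
  unfold Pre_largestSubmatrix; infer_instance

def pvWitness_largestSubmatrix : List (List Int) := [[1, 0, 1], [1, 1, 0]]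

def Spec_largestSubmatrix (matrix : List (List Int)) (out : Int) : Prop := out = largestSubmatrix_alt matrix
instance (matrix : List (List Int)) (out : Int) : Decidable (Spec_largestSubmatrix matrix out) := by
  unfold Spec_largestSubmatrix; infer_instance

-- ===== CLAIM (what is proved, stated in full; the proofs are below) =====
def Claim_equal_largestSubmatrix : Prop := ∀ (matrix : List (List Int)), Dom_largestSubmatrix matrix → Pre_largestSubmatrix matrix → Spec_largestSubmatrix matrix (largestSubmatrix matrix)

-- ===== LEMMAS AND PROOFS =====

-- the common abstraction: the height row produced from the previous one, and the row sequence
def hrow (n : Nat) (prev row : List Int) : List Int :=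
  (List.range n).map (fun (j : Nat) =>
    if PySem.List.pyGetD row (j : Int) 0 ≠ 0 then PySem.List.pyGetD prev (j : Int) 0 + 1 else 0)

def hseq (n : Nat) : List (List Int) → List Int → List (List Int)
  | [], _ => []
  | r :: rs, prev => hrow n prev r :: hseq n rs (hrow n prev r)

def lastH (n : Nat) : List (List Int) → List Int → List Int
  | [], p => p
  | r :: rs, p => lastH n rs (hrow n p r)

def rowBest (res : Int) (row : List Int) : Int :=
  scanA (PySem.List.sorted row (fun x => x) true) 0 res

-- B's fold body, named (definitionally equal to the lambda in the port)
def stepB (m n : Nat) (s : List Int × Int) (row : List Int) : List Int × Int :=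
  let heights := (List.range n).map (fun (j : Nat) =>
    if PySem.List.pyGetD row (j : Int) 0 ≠ 0 then PySem.List.pyGetD s.1 (j : Int) 0 + 1 else 0)
  let cnt := heights.foldl (fun c h => c.set h.toNat (PySem.List.pyGetD c h 0 + 1))
      (List.replicate (m + 1) (0 : Int))
  let fin := (PySem.List.pyRange (m : Int) 0 (-1)).foldl
      (fun (q : Int × Int) h =>
        let ge := q.1 + PySem.List.pyGetD cnt h 0
        (ge, if h * ge > q.2 then h * ge else q.2)) ((0 : Int), s.2)
  (heights, fin.2)

lemma alt_eq (matrix : List (List Int)) :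
    largestSubmatrix_alt matrix =
      (matrix.foldl (stepB matrix.length ((PySem.List.pyGetD matrix 0 []).length))
        (List.replicate ((PySem.List.pyGetD matrix 0 []).length) 0, (0 : Int))).2 := rfl

-- basic facts ---------------------------------------------------------------

lemma getD_zero_or_mem (prev : List Int) (j : Nat) :
    prev.getD j 0 = 0 ∨ prev.getD j 0 ∈ prev := by
  by_cases h : j < prev.length
  · right; rw [List.getD_eq_getElem _ _ h]; exact List.getElem_mem h
  · left; exact List.getD_eq_default _ _ (by omega)

lemma hrow_bound {n : Nat} {prev row : List Int} {B : Int} (hB : 0 ≤ B)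
    (h : ∀ x ∈ prev, 0 ≤ x ∧ x ≤ B) : ∀ y ∈ hrow n prev row, 0 ≤ y ∧ y ≤ B + 1 := by
  intro y hy
  rw [hrow] at hy
  obtain ⟨j, -, rfl⟩ := List.mem_map.1 hy
  rw [PySem.List.pyGetD_natCast, PySem.List.pyGetD_natCast]
  split
  · rcases getD_zero_or_mem prev j with h0 | hm
    · rw [h0]; constructor <;> omega
    · have := h _ hm; constructor <;> omega
  · constructor <;> omega

-- counting: cnt[i] after the count loop is the number of heights equal to i ---

lemma cnt_getD : ∀ (hs c : List Int) (i : Nat), (∀ x ∈ hs, 0 ≤ x ∧ x.toNat < c.length) →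
    (hs.foldl (fun c h => c.set h.toNat (PySem.List.pyGetD c h 0 + 1)) c).getD i 0
      = c.getD i 0 + (hs.countP (fun x => x == (i : Int)) : Int) := by
  intro hs
  induction hs with
  | nil => intro c i _; simp
  | cons h t ih =>
    intro c i hb
    have hh := hb h List.mem_cons_self
    rw [List.foldl_cons, ih _ i (fun x hx => ⟨(hb x (List.mem_cons_of_mem _ hx)).1, by
      have := (hb x (List.mem_cons_of_mem _ hx)).2; simpa [List.length_set] using this⟩)]
    rw [List.countP_cons]
    have hread : PySem.List.pyGetD c h 0 = c.getD h.toNat 0 :=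
      PySem.List.pyGetD_of_nonneg c 0 hh.1
    by_cases he : h.toNat = i
    · have hbeq : (h == (i : Int)) = true := by
        simp only [beq_iff_eq]; omega
      rw [hbeq]
      have : (c.set h.toNat (PySem.List.pyGetD c h 0 + 1)).getD i 0 = c.getD i 0 + 1 := by
        subst he
        rw [hread, List.getD, List.getElem?_set_self (by omega), List.getD,
          List.getElem?_eq_getElem (by omega)]
        simp
      rw [this]; simp; ring
    · have hbeq : (h == (i : Int)) = false := by
        simp only [beq_eq_false_iff_ne, ne_eq]; omega
      rw [hbeq]
      have : (c.set h.toNat (PySem.List.pyGetD c h 0 + 1)).getD i 0 = c.getD i 0 := by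
        rw [List.getD, List.getElem?_set_ne he, ← List.getD]
      rw [this]; push_cast; ring

-- countP arithmetic ----------------------------------------------------------

lemma countP_ge_split (hs : List Int) (h : Int) :
    hs.countP (fun x => decide (h ≤ x))
      = hs.countP (fun x => decide (h < x)) + hs.countP (fun x => x == h) := by
  induction hs with
  | nil => rfl
  | cons x t ih =>
    simp only [List.countP_cons]
    by_cases h1 : h ≤ x
    · by_cases h2 : x = h
      · subst h2; simp; omega
      · have h3 : h < x := by omega
        simp [h1, h3, h2]; omega
    · have h2 : ¬ h < x := by omega
      have h3 : x ≠ h := by omega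
      simp [h1, h2, h3]; omega

lemma countP_lt_succ (hs : List Int) (k : Int) :
    hs.countP (fun x => decide (k < x)) = hs.countP (fun x => decide (k + 1 ≤ x)) :=
  List.countP_congr (fun x _ => by simp only [decide_eq_true_eq]; omega)

-- the threshold loop, with ge maintained as countP (> threshold) --------------

lemma thr (cnt hs : List Int) (m : Nat)
    (Hc : ∀ h : Int, 1 ≤ h → h ≤ (m : Int) →
      PySem.List.pyGetD cnt h 0 = (hs.countP (fun x => x == h) : Int)) :
    ∀ (k : Nat), k ≤ m → ∀ res : Int,
    ((PySem.List.pyRange (k : Int) 0 (-1)).foldl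
       (fun (q : Int × Int) h =>
         let ge := q.1 + PySem.List.pyGetD cnt h 0
         (ge, if h * ge > q.2 then h * ge else q.2))
       ((hs.countP (fun x => decide ((k : Int) < x)) : Int), res)).2
    = ((PySem.List.pyRange (k : Int) 0 (-1)).map
        (fun h => h * (hs.countP (fun x => decide (h ≤ x)) : Int))).foldl max res := by
  intro k
  induction k with
  | zero =>
    intro _ res
    rw [show ((0 : Nat) : Int) = (0 : Int) by norm_num, PySem.List.pyRange_neg_one_eq_nil le_rfl]
    rfl
  | succ k ih =>
    intro hk res
    have hcons : PySem.List.pyRange ((k + 1 : Nat) : Int) 0 (-1)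
        = ((k + 1 : Nat) : Int) :: PySem.List.pyRange ((k : Nat) : Int) 0 (-1) := by
      have := PySem.List.pyRange_neg_one_cons (a := ((k + 1 : Nat) : Int)) (b := 0) (by omega)
      rwa [show ((k + 1 : Nat) : Int) - 1 = ((k : Nat) : Int) by push_cast; ring] at this
    rw [hcons, List.foldl_cons, List.map_cons, List.foldl_cons]
    have hge : (hs.countP (fun x => decide (((k + 1 : Nat) : Int) < x)) : Int)
        + PySem.List.pyGetD cnt ((k + 1 : Nat) : Int) 0
        = (hs.countP (fun x => decide (((k + 1 : Nat) : Int) ≤ x)) : Int) := by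
      rw [Hc _ (by omega) (by exact_mod_cast Nat.cast_le.2 hk), countP_ge_split hs ((k + 1 : Nat) : Int)]
      push_cast; ring
    have hshift : hs.countP (fun x => decide (((k + 1 : Nat) : Int) < x))
        = hs.countP (fun x => decide ((((k + 1 : Nat) : Int)) + 1 ≤ x)) := countP_lt_succ hs _
    have hback : hs.countP (fun x => decide (((k : Nat) : Int) < x))
        = hs.countP (fun x => decide (((k + 1 : Nat) : Int) ≤ x)) := by
      rw [countP_lt_succ hs ((k : Nat) : Int)]
      exact List.countP_congr (fun x _ => by simp only [decide_eq_true_eq]; constructor <;> (intro; push_cast at *; omega))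
    simp only
    rw [hge]
    have hif : ∀ (a r : Int), (if a > r then a else r) = max r a := by
      intro a r
      rcases lt_or_ge r a with h | h
      · rw [if_pos h, max_eq_right (le_of_lt h)]
      · rw [if_neg (by omega), max_eq_left h]
    rw [hif]
    rw [show (hs.countP (fun x => decide (((k + 1 : Nat) : Int) ≤ x)) : Int)
        = ((hs.countP (fun x => decide (((k : Nat) : Int) < x)) : Nat) : Int) by rw [hback]]
    exact ih (by omega) _

-- break-scan on a descending nonneg list = full enumerate-scan ----------------

lemma fold_zeros : ∀ (S : List Int) (j : Int) (res : Int),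
    (∀ x ∈ S, x = 0) → 0 ≤ res →
    (PySem.List.enumerate S j).foldl (fun r p => max r (p.2 * (p.1 + 1))) res = res := by
  intro S
  induction S with
  | nil => intro j res _ _; rfl
  | cons h t ih =>
    intro j res hz h0
    rw [show PySem.List.enumerate (h :: t) j = (j, h) :: PySem.List.enumerate t (j + 1) from rfl,
      List.foldl_cons]
    have hh : h = 0 := hz h (List.mem_cons_self)
    subst hh
    rw [show ((j, (0 : Int)).2 * ((j, (0 : Int)).1 + 1)) = 0 by simp, max_eq_left h0]
    exact ih (j + 1) res (fun x hx => hz x (List.mem_cons_of_mem _ hx)) h0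

lemma scanA_ge (S : List Int) : ∀ (j : Nat) (res : Int), res ≤ scanA S j res := by
  induction S with
  | nil => intro j res; exact le_rfl
  | cons h t ih =>
    intro j res
    rw [scanA]
    split
    · exact le_rfl
    · exact le_trans (le_max_left _ _) (ih _ _)

lemma scan_eq : ∀ (S : List Int) (j : Nat) (res : Int), 0 ≤ res →
    S.Pairwise (fun a b => b ≤ a) → (∀ x ∈ S, 0 ≤ x) →
    (PySem.List.enumerate S (j : Int)).foldl (fun r p => max r (p.2 * (p.1 + 1))) res = scanA S j res := by
  intro S
  induction S with
  | nil => intro j res _ _ _; rfl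
  | cons h t ih =>
    intro j res h0 hpw hnn
    rw [List.pairwise_cons] at hpw
    rw [show PySem.List.enumerate (h :: t) (j : Int)
        = ((j : Int), h) :: PySem.List.enumerate t ((j : Int) + 1) from rfl,
      List.foldl_cons, scanA]
    by_cases hh : h = 0
    · subst hh
      simp only [BEq.rfl, if_true]
      rw [show (((j : Int), (0 : Int)).2 * (((j : Int), (0 : Int)).1 + 1)) = 0 by simp,
        max_eq_left h0]
      exact fold_zeros t ((j : Int) + 1) res
        (fun x hx => le_antisymm (hpw.1 x hx) (hnn x (List.mem_cons_of_mem _ hx))) h0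
    · rw [if_neg (by simpa using hh)]
      have hcast : ((j : Int) + 1) = ((j + 1 : Nat) : Int) := by push_cast; ring
      rw [hcast]
      exact ih (j + 1) (max res (h * ((j : Int) + 1)))
        (le_trans h0 (le_max_left _ _)) hpw.2
        (fun x hx => hnn x (List.mem_cons_of_mem _ hx))

-- prefix structure of a descending list ---------------------------------------

lemma sorted_count_ge (S : List Int) (hp : S.Pairwise (fun a b => b ≤ a))
    (j : Nat) (hj : j < S.length) :
    j + 1 ≤ S.countP (fun x => decide (S[j] ≤ x)) := by
  have hpg := List.pairwise_iff_getElem.1 hp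
  set v := S[j] with hv
  have htake : (S.take (j + 1)).countP (fun x => decide (v ≤ x)) = (S.take (j + 1)).length := by
    rw [List.countP_eq_length]
    intro a ha
    obtain ⟨i, hi, rfl⟩ := List.mem_iff_getElem.1 ha
    rw [List.getElem_take]
    have hij : i < j + 1 := lt_of_lt_of_le hi (by rw [List.length_take]; omega)
    simp only [decide_eq_true_eq]
    rcases Nat.lt_or_ge i j with h | h
    · exact le_trans (le_of_eq hv) (hpg i j (by omega) hj h)
    · have : i = j := by omega
      subst this; exact hv.le
  calc j + 1 = (S.take (j + 1)).length := by rw [List.length_take]; omega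
    _ = (S.take (j + 1)).countP (fun x => decide (v ≤ x)) := htake.symm
    _ ≤ S.countP (fun x => decide (v ≤ x)) := by
        conv_rhs => rw [← List.take_append_drop (j + 1) S]
        rw [List.countP_append]; omega

lemma sorted_nth_ge (S : List Int) (hp : S.Pairwise (fun a b => b ≤ a)) (h : Int)
    (hc : 1 ≤ S.countP (fun x => decide (h ≤ x))) :
    ∃ hlt : S.countP (fun x => decide (h ≤ x)) - 1 < S.length,
      h ≤ S[S.countP (fun x => decide (h ≤ x)) - 1] := by
  have hpg := List.pairwise_iff_getElem.1 hp
  set c := S.countP (fun x => decide (h ≤ x)) with hc_def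
  have hcl : c ≤ S.length := List.countP_le_length
  have hlt : c - 1 < S.length := by omega
  refine ⟨hlt, ?_⟩
  by_contra hcon
  rw [not_le] at hcon
  have hdrop : (S.drop (c - 1)).countP (fun x => decide (h ≤ x)) = 0 := by
    rw [List.countP_eq_zero]
    intro a ha
    obtain ⟨i, hi, rfl⟩ := List.mem_iff_getElem.1 ha
    rw [List.getElem_drop]
    simp only [decide_eq_true_eq, not_le]
    have hi' : c - 1 + i < S.length := by rw [List.length_drop] at hi; omega
    rcases Nat.eq_zero_or_pos i with h0 | h0
    · subst h0; simpa using hcon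
    · exact lt_of_le_of_lt (hpg (c - 1) (c - 1 + i) hlt hi' (by omega)) hcon
  have : c ≤ c - 1 := by
    calc c = S.countP (fun x => decide (h ≤ x)) := hc_def
      _ = (S.take (c - 1)).countP (fun x => decide (h ≤ x))
          + (S.drop (c - 1)).countP (fun x => decide (h ≤ x)) := by
          conv_lhs => rw [← List.take_append_drop (c - 1) S]
          rw [List.countP_append]
      _ = (S.take (c - 1)).countP (fun x => decide (h ≤ x)) := by rw [hdrop]; omega
      _ ≤ (S.take (c - 1)).length := List.countP_le_length
      _ ≤ c - 1 := by rw [List.length_take]; omega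
  omega

-- the two term lists have the same running maximum -----------------------------

lemma core (m : Nat) (hs : List Int) (res : Int) (h0 : 0 ≤ res)
    (hb : ∀ x ∈ hs, 0 ≤ x ∧ x ≤ (m : Int)) :
    ((PySem.List.pyRange (m : Int) 0 (-1)).map
        (fun h => h * (hs.countP (fun x => decide (h ≤ x)) : Int))).foldl max res
    = rowBest res hs := by
  set S := PySem.List.sorted hs (fun x => x) true with hS
  have hperm : S.Perm hs := PySem.List.sorted_perm hs (fun x => x) true
  have hpw : S.Pairwise (fun a b => b ≤ a) := by
    simpa using PySem.List.sorted_pairwise_rev hs (fun x => x)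
  have hbS : ∀ x ∈ S, 0 ≤ x ∧ x ≤ (m : Int) := fun x hx => hb x (hperm.mem_iff.1 hx)
  have hscan : rowBest res hs
      = ((PySem.List.enumerate S 0).map (fun p => p.2 * (p.1 + 1))).foldl max res := by
    rw [rowBest, ← hS, ← scan_eq S 0 res h0 hpw (fun x hx => (hbS x hx).1)]
    rw [List.foldl_map]
    rfl
  rw [hscan]
  set T1 := (PySem.List.pyRange (m : Int) 0 (-1)).map
      (fun h => h * (hs.countP (fun x => decide (h ≤ x)) : Int)) with hT1
  set T2 := (PySem.List.enumerate S 0).map (fun p => p.2 * (p.1 + 1)) with hT2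
  have hcount : ∀ h : Int, hs.countP (fun x => decide (h ≤ x)) = S.countP (fun x => decide (h ≤ x)) :=
    fun h => (List.Perm.countP_eq _ hperm).symm
  apply le_antisymm
  · -- every term of T1 is dominated in T2
    rcases PySem.List.foldl_max_mem T1 res with hcase | hcase
    · rw [hcase]; exact (PySem.List.le_foldl_max T2 res).1
    · obtain ⟨h, hh, heq⟩ := List.mem_map.1 hcase
      rw [← heq]
      obtain ⟨hh1, hh2⟩ := PySem.List.mem_pyRange_neg_one.1 hh
      rw [hcount]
      rcases Nat.eq_zero_or_pos (S.countP (fun x => decide (h ≤ x))) with hc0 | hc1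
      · rw [hc0]
        exact le_trans (by simp) (le_trans h0 (PySem.List.le_foldl_max T2 res).1)
      · obtain ⟨hlt, hge⟩ := sorted_nth_ge S hpw h hc1
        set c := S.countP (fun x => decide (h ≤ x))
        have hmem2 : S[c - 1] * (((c - 1 : Nat) : Int) + 1) ∈ T2 := by
          rw [hT2]
          exact List.mem_map.2 ⟨((0 : Int) + ((c - 1 : Nat) : Int), S[c - 1]),
            (PySem.List.mem_enumerate_iff S 0 _).2 ⟨c - 1, hlt, rfl⟩, by push_cast; ring_nf⟩
        have hle : h * (c : Int) ≤ S[c - 1] * (((c - 1 : Nat) : Int) + 1) := by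
          have hcc : (((c - 1 : Nat) : Int) + 1) = (c : Int) := by omega
          rw [hcc]
          exact mul_le_mul_of_nonneg_right hge (by positivity)
        exact le_trans hle ((PySem.List.le_foldl_max T2 res).2 _ hmem2)
  · -- every term of T2 is dominated in T1
    rcases PySem.List.foldl_max_mem T2 res with hcase | hcase
    · rw [hcase]; exact (PySem.List.le_foldl_max T1 res).1
    · obtain ⟨p, hp, heq⟩ := List.mem_map.1 hcase
      rw [← heq]
      obtain ⟨j, hj, rfl⟩ := (PySem.List.mem_enumerate_iff S 0 p).1 hp
      simp only
      have hx := hbS S[j] (List.getElem_mem hj)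
      rcases eq_or_lt_of_le hx.1 with hz | hpos
      · rw [← hz]
        exact le_trans (by simp) (le_trans h0 (PySem.List.le_foldl_max T1 res).1)
      · have hmem1 : S[j] * (hs.countP (fun x => decide (S[j] ≤ x)) : Int) ∈ T1 := by
          rw [hT1]
          exact List.mem_map.2 ⟨S[j], PySem.List.mem_pyRange_neg_one.2 ⟨hpos, hx.2⟩, rfl⟩
        have hcnt : ((j : Int) + 1) ≤ (hs.countP (fun x => decide (S[j] ≤ x)) : Int) := by
          rw [hcount]
          have := sorted_count_ge S hpw j hj
          omega
        have hle : S[j] * ((0 : Int) + (j : Int) + 1)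
            ≤ S[j] * (hs.countP (fun x => decide (S[j] ≤ x)) : Int) := by
          rw [show ((0 : Int) + (j : Int) + 1) = ((j : Int) + 1) by ring]
          exact mul_le_mul_of_nonneg_left hcnt (le_of_lt hpos)
        exact le_trans hle ((PySem.List.le_foldl_max T1 res).2 _ hmem1)

-- one row of B equals one row of A --------------------------------------------

lemma row_eqB (m : Nat) (hs : List Int) (res : Int) (h0 : 0 ≤ res)
    (hb : ∀ x ∈ hs, 0 ≤ x ∧ x ≤ (m : Int)) :
    ((PySem.List.pyRange (m : Int) 0 (-1)).foldl
       (fun (q : Int × Int) h =>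
         let ge := q.1 + PySem.List.pyGetD
           (hs.foldl (fun c h => c.set h.toNat (PySem.List.pyGetD c h 0 + 1))
             (List.replicate (m + 1) (0 : Int))) h 0
         (ge, if h * ge > q.2 then h * ge else q.2)) ((0 : Int), res)).2
    = rowBest res hs := by
  set cnt := hs.foldl (fun c h => c.set h.toNat (PySem.List.pyGetD c h 0 + 1))
      (List.replicate (m + 1) (0 : Int)) with hcnt_def
  have Hc : ∀ h : Int, 1 ≤ h → h ≤ (m : Int) →
      PySem.List.pyGetD cnt h 0 = (hs.countP (fun x => x == h) : Int) := by
    intro h h1 h2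
    have hread : PySem.List.pyGetD cnt h 0 = cnt.getD h.toNat 0 :=
      PySem.List.pyGetD_of_nonneg cnt 0 (by omega)
    rw [hread, hcnt_def, cnt_getD hs _ h.toNat (fun x hx => ⟨(hb x hx).1, by
      rw [List.length_replicate]
      have := (hb x hx).2; omega⟩)]
    rw [List.getD_eq_getElem _ _ (by rw [List.length_replicate]; omega)]
    rw [List.getElem_replicate]
    rw [show ((h.toNat : Nat) : Int) = h by omega]
    ring
  have hz : hs.countP (fun x => decide ((m : Int) < x)) = 0 :=
    List.countP_eq_zero.2 (fun x hx => by
      simp only [decide_eq_true_eq, not_lt]; exact (hb x hx).2)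
  have ht := thr cnt hs m Hc m le_rfl res
  rw [hz] at ht
  simp only [Nat.cast_zero] at ht
  rw [ht, core m hs res h0 hb]

-- B's fold equals A's second loop over the height-row sequence ---------------

lemma glue (m n : Nat) : ∀ (rs : List (List Int)) (prev : List Int) (res : Int),
    0 ≤ res → rs.length ≤ m →
    (∀ x ∈ prev, 0 ≤ x ∧ x + rs.length ≤ (m : Int)) →
    (rs.foldl (stepB m n) (prev, res)).2 = (hseq n rs prev).foldl rowBest res := by
  intro rs
  induction rs with
  | nil => intro prev res _ _ _; rfl
  | cons r rs ih =>
    intro prev res h0 hlen hinv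
    have hlen' : rs.length + 1 ≤ m := by simpa using hlen
    have hB : (0 : Int) ≤ (m : Int) - 1 - rs.length := by
      have : ((rs.length : Int) + 1) ≤ (m : Int) := by exact_mod_cast hlen'
      omega
    have hbound := hrow_bound (n := n) (row := r) hB (fun x hx =>
      ⟨(hinv x hx).1, by have := (hinv x hx).2; simp at this; omega⟩)
    have hb' : ∀ y ∈ hrow n prev r, 0 ≤ y ∧ y ≤ (m : Int) := fun y hy =>
      ⟨(hbound y hy).1, by have := (hbound y hy).2; omega⟩
    have hstep : stepB m n (prev, res) r
        = (hrow n prev r,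
          ((PySem.List.pyRange (m : Int) 0 (-1)).foldl
            (fun (q : Int × Int) h =>
              let ge := q.1 + PySem.List.pyGetD
                ((hrow n prev r).foldl (fun c h => c.set h.toNat (PySem.List.pyGetD c h 0 + 1))
                  (List.replicate (m + 1) (0 : Int))) h 0
              (ge, if h * ge > q.2 then h * ge else q.2)) ((0 : Int), res)).2) := rfl
    rw [List.foldl_cons, hstep, row_eqB m (hrow n prev r) res h0 hb']
    have hrec := ih (hrow n prev r) (rowBest res (hrow n prev r))
      (le_trans h0 (scanA_ge _ _ _)) (by omega) (fun x hx =>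
        ⟨(hbound x hx).1, by have := (hbound x hx).2; omega⟩)
    rw [hrec]
    rfl

-- A's first loop builds the height-row sequence ------------------------------

lemma hseq_len (n : Nat) : ∀ (rs : List (List Int)) (p : List Int), (hseq n rs p).length = rs.length := by
  intro rs
  induction rs with
  | nil => intro p; rfl
  | cons r rs ih => intro p; simp [hseq, ih]

lemma lastH_eq (n : Nat) : ∀ (rs : List (List Int)) (p : List Int),
    (hseq n rs p).getLastD p = lastH n rs p := by
  intro rs
  induction rs with
  | nil => intro p; rfl
  | cons r rs ih => intro p; rw [hseq, List.getLastD_cons, ih, lastH]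

lemma hseq_append (n : Nat) : ∀ (rs : List (List Int)) (r p : List Int),
    hseq n (rs ++ [r]) p = hseq n rs p ++ [hrow n (lastH n rs p) r] := by
  intro rs
  induction rs with
  | nil => intro r p; rfl
  | cons r' rs ih => intro r p; rw [List.cons_append, hseq, ih, hseq, lastH]; rfl

lemma build_eq (matrix : List (List Int)) (n : Nat) : ∀ (k : Nat), k ≤ matrix.length →
    (List.range k).foldl (fun acc (i : Nat) =>
        acc ++ [(List.range n).map (fun (j : Nat) =>
          if PySem.List.pyGetD (PySem.List.pyGetD matrix (i : Int) []) (j : Int) 0 == 0 then (0 : Int)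
          else if 0 < i then 1 + PySem.List.pyGetD (PySem.List.pyGetD acc ((i : Int) - 1) []) (j : Int) 0
          else 1)]) ([] : List (List Int))
      = hseq n (matrix.take k) (List.replicate n 0) := by
  intro k
  induction k with
  | zero => intro _; rfl
  | succ k ih =>
    intro hk
    have hk' : k < matrix.length := hk
    rw [List.range_succ, List.foldl_append, ih (by omega), List.foldl_cons, List.foldl_nil,
      List.take_add_one, List.getElem?_eq_getElem hk']
    simp only [Option.toList_some]
    rw [hseq_append]
    congr 1
    have hm1 : PySem.List.pyGetD matrix (k : Int) [] = matrix[k] := by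
      rw [PySem.List.pyGetD_natCast, List.getD_eq_getElem _ _ hk']
    congr 1
    rw [hrow]
    refine (List.map_congr_left ?_)
    intro j hj
    by_cases hk0 : k = 0
    · subst hk0
      have hz : PySem.List.pyGetD (lastH n (List.take 0 matrix) (List.replicate n 0)) (j : Int) 0 = 0 := by
        show PySem.List.pyGetD (List.replicate n 0) (j : Int) 0 = 0
        rw [PySem.List.pyGetD_natCast]
        rcases getD_zero_or_mem (List.replicate n 0) j with h | h
        · exact h
        · exact List.eq_of_mem_replicate h
      rw [hm1, hz]
      by_cases hx : (PySem.List.pyGetD (matrix[0]) (j : Int) 0) = 0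
      · simp [hx]
      · simp
    · have hkpos : 0 < k := Nat.pos_of_ne_zero hk0
      have hL : (hseq n (List.take k matrix) (List.replicate n 0)).length = k := by
        rw [hseq_len, List.length_take]; omega
      have hprev : PySem.List.pyGetD (hseq n (List.take k matrix) (List.replicate n 0)) ((k : Int) - 1) []
          = lastH n (List.take k matrix) (List.replicate n 0) := by
        have hcast : ((k : Int) - 1) = ((k - 1 : Nat) : Int) := by omega
        rw [hcast, PySem.List.pyGetD_natCast, ← lastH_eq,
          List.getD_eq_getElem _ _ (by omega), List.getLastD_eq_getLast?, List.getLast?_eq_getElem?,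
          List.getElem?_eq_getElem (by omega)]
        simp [hL]
      rw [hm1, hprev]
      by_cases hx : (PySem.List.pyGetD (matrix[k]) (j : Int) 0) = 0
      · simp [hx]
      · simp [hkpos, add_comm]

-- ===== VERDICT (by name: the statement is the Claim_ definition above) =====
theorem largestSubmatrix_spec : Claim_equal_largestSubmatrix := by
  intro matrix _ _
  unfold Spec_largestSubmatrix
  rw [alt_eq]
  rw [glue matrix.length ((PySem.List.pyGetD matrix 0 []).length) matrix
    (List.replicate ((PySem.List.pyGetD matrix 0 []).length) 0) 0 le_rfl le_rfl
    (fun x hx => by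
      rw [List.eq_of_mem_replicate hx]
      exact ⟨le_rfl, by simp⟩)]
  simp only [largestSubmatrix]
  rw [build_eq matrix ((PySem.List.pyGetD matrix 0 []).length) matrix.length le_rfl,
    List.take_length]
  rfl
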